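-- pv_equiv track=rewrite | github.com/pokk/algorithm | weian/DynamicProgramming/longest_path_in_matrix.py | lpm_dp_table
-- ===== SOURCE A (Python) =====
-- def _lpm_dp_table(array, table, n, i, j):
--     num = array[i][j] + 1
--     if i + 1 < n:
--         if array[i+1][j] == num:
--             if table[i+1][j]:
--                 table[i][j] = table[i+1][j] + 1
--             else:
--                 table[i][j] = _lpm_dp_table(array, table, n, i+1, j) + 1
--             return table[i][j]
--
--     if j + 1 < n:
--         if array[i][j+1] == num:
--             if table[i][j+1]:
--                 table[i][j] = table[i][j+1] + 1
--             else:
--                 table[i][j] = _lpm_dp_table(array, table, n, i, j+1) + 1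
--             return table[i][j]
--
--     if j > 0:
--         if array[i][j-1] == num:
--             if table[i][j-1]:
--                 table[i][j] = table[i][j-1] + 1
--             else:
--                 table[i][j] = _lpm_dp_table(array, table, n, i, j-1) + 1
--             return table[i][j]
--
--     if i > 0:
--         if array[i-1][j] == num:
--             if table[i-1][j]:
--                 table[i][j] = table[i-1][j] + 1
--             else:
--                 table[i][j] = _lpm_dp_table(array, table, n, i-1, j) + 1
--             return table[i][j]
--
--     table[i][j] = 1
--
--     return table[i][j]
--
-- def lpm_dp_table(array, n):
--     dp_table = [[0 for _ in range(n)] for _ in range(n)]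
--
--     for i in range(n):
--         for j in range(n):
--             _lpm_dp_table(array, dp_table, n, i, j)
--
--     longest = 0
--
--     for i in range(n):
--         for j in range(n):
--             longest = max(longest, dp_table[i][j])
--
--     return longest
-- ===== SOURCE B (Python) =====
-- def lpm_dp_table(array, n):
--     def step(i, j):
--         num = array[i][j] + 1
--         if i + 1 < n and array[i + 1][j] == num:
--             return (i + 1, j)
--         if j + 1 < n and array[i][j + 1] == num:
--             return (i, j + 1)
--         if j > 0 and array[i][j - 1] == num:
--             return (i, j - 1)
--         if i > 0 and array[i - 1][j] == num:
--             return (i - 1, j)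
--         return None
--
--     longest = 0
--     for i in range(n):
--         for j in range(n):
--             length = 1
--             cell = (i, j)
--             while True:
--                 nxt = step(*cell)
--                 if nxt is None:
--                     break
--                 length += 1
--                 cell = nxt
--             longest = max(longest, length)
--     return longest
-- ===== Notes on version B (the rewrite author's own statement) =====
-- stated objective: simpler
-- what changed: A builds an n-by-n memo table and fills it by recursive memoized DP with in-place mutation; B drops the table entirely and, for each start cell, just walks the greedy chain forward with an iterative while-loop counting steps, keeping the same down>right>left>up neighbour priority.
import Mathlib
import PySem

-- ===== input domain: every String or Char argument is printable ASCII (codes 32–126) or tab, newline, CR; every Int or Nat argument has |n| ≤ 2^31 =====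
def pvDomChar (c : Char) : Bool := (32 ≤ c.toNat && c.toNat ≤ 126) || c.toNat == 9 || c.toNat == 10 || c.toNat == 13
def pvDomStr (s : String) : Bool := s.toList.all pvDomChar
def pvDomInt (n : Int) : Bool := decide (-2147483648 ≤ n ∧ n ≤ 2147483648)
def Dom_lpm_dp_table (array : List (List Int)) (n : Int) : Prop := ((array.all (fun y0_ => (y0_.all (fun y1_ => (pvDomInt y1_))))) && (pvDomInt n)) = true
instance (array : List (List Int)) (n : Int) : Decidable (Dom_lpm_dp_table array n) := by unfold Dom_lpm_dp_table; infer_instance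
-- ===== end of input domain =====

-- B replaces A's mutable memo table and recursive memoized DP by a table-free iterative
-- walk along each cell's greedy chain (same down>right>left>up priority); objective: simpler.

-- ===== PORT A =====
-- shared 2-d read  array[i][j]; indices are always ≥ 0 here and in bounds inside Pre_,
-- so List.getD with toNat is exact there (Python raises out of bounds; Pre_ excludes that).
def pvGA (a : List (List Int)) (i j : Int) : Int := (a.getD i.toNat []).getD j.toNat 0

-- bound used only by the termination measures of the recursions below
def pvKA (a : List (List Int)) : Int := 1 + a.flatten.foldl max 0

theorem pv_init_le_foldl_max (l : List Int) (init : Int) : init ≤ l.foldl max init := by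
  induction l generalizing init with
  | nil => simp
  | cons h t ih => exact le_trans (le_max_left init h) (ih (max init h))

theorem pv_mem_le_foldl_max (l : List Int) (init x : Int) (hx : x ∈ l) : x ≤ l.foldl max init := by
  induction l generalizing init with
  | nil => simp at hx
  | cons h t ih =>
    rcases List.mem_cons.mp hx with rfl | hx'
    · exact le_trans (le_max_right init x) (pv_init_le_foldl_max t (max init x))
    · exact ih (max init h) hx'

theorem pvGA_lt_K (a : List (List Int)) (i j : Int) : pvGA a i j < pvKA a := by
  unfold pvGA pvKA
  have h0 : (0:Int) ≤ a.flatten.foldl max 0 := pv_init_le_foldl_max _ 0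
  by_cases hi : i.toNat < a.length
  · have hrow : a.getD i.toNat [] = a[i.toNat] := List.getD_eq_getElem a [] hi
    by_cases hj : j.toNat < (a[i.toNat]).length
    · have hv : (a.getD i.toNat []).getD j.toNat 0 = (a[i.toNat])[j.toNat] := by
        rw [hrow]; exact List.getD_eq_getElem _ 0 hj
      have hmem : (a[i.toNat])[j.toNat] ∈ a.flatten :=
        List.mem_flatten.mpr ⟨a[i.toNat], List.getElem_mem hi, List.getElem_mem hj⟩
      rw [hv]
      exact lt_of_le_of_lt (pv_mem_le_foldl_max a.flatten 0 _ hmem) (lt_one_add _)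
    · have hz : (a.getD i.toNat []).getD j.toNat 0 = 0 := by
        rw [hrow]; exact List.getD_eq_default _ 0 (Nat.le_of_not_lt hj)
      rw [hz]
      exact lt_of_le_of_lt h0 (lt_one_add _)
  · have hz : a.getD i.toNat [] = [] := List.getD_eq_default a [] (Nat.le_of_not_lt hi)
    rw [hz]
    exact lt_of_le_of_lt h0 (lt_one_add _)

-- small arithmetic facts kept standalone so every termination/bounds proof is tiny
theorem pv_toNat_lt (i n : Int) (h0 : 0 ≤ i) (h : i < n) : i.toNat < n.toNat := by
  have h1 : (i.toNat : Int) = i := Int.toNat_of_nonneg h0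
  have h2 : (n.toNat : Int) = n := Int.toNat_of_nonneg (le_of_lt (lt_of_le_of_lt h0 h))
  exact Int.ofNat_lt.mp (by rw [h1, h2]; exact h)

theorem pv_dec2 (K x y : Int) (hy : y = x + 1) (hK : x < K) :
    (K - y).toNat < (K - x).toNat := by
  subst hy
  have h1 : x + 1 ≤ K := Int.lt_iff_add_one_le.mp hK
  exact pv_toNat_lt _ _ (sub_nonneg.mpr h1) (sub_lt_sub_left (lt_add_one x) K)

-- table[i][j] = v   (mutation ported as a functional update)
def pvSet (t : List (List Int)) (i j v : Int) : List (List Int) :=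
  t.set i.toNat ((t.getD i.toNat []).set j.toNat v)

-- literal port of _lpm_dp_table: the mutable table is threaded through, (new table, returned value)
def lpmAux (a t : List (List Int)) (n i j : Int) : List (List Int) × Int :=
  if h1 : i + 1 < n ∧ pvGA a (i+1) j = pvGA a i j + 1 then
    if pvGA t (i+1) j ≠ 0 then
      let t' := pvSet t i j (pvGA t (i+1) j + 1)
      (t', pvGA t' i j)
    else
      let r := lpmAux a t n (i+1) j
      let t' := pvSet r.1 i j (r.2 + 1)
      (t', pvGA t' i j)
  else if h2 : j + 1 < n ∧ pvGA a i (j+1) = pvGA a i j + 1 then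
    if pvGA t i (j+1) ≠ 0 then
      let t' := pvSet t i j (pvGA t i (j+1) + 1)
      (t', pvGA t' i j)
    else
      let r := lpmAux a t n i (j+1)
      let t' := pvSet r.1 i j (r.2 + 1)
      (t', pvGA t' i j)
  else if h3 : 0 < j ∧ pvGA a i (j-1) = pvGA a i j + 1 then
    if pvGA t i (j-1) ≠ 0 then
      let t' := pvSet t i j (pvGA t i (j-1) + 1)
      (t', pvGA t' i j)
    else
      let r := lpmAux a t n i (j-1)
      let t' := pvSet r.1 i j (r.2 + 1)
      (t', pvGA t' i j)
  else if h4 : 0 < i ∧ pvGA a (i-1) j = pvGA a i j + 1 then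
    if pvGA t (i-1) j ≠ 0 then
      let t' := pvSet t i j (pvGA t (i-1) j + 1)
      (t', pvGA t' i j)
    else
      let r := lpmAux a t n (i-1) j
      let t' := pvSet r.1 i j (r.2 + 1)
      (t', pvGA t' i j)
  else
    let t' := pvSet t i j 1
    (t', pvGA t' i j)
termination_by (pvKA a - pvGA a i j).toNat
decreasing_by
  · exact pv_dec2 _ _ _ h1.2 (pvGA_lt_K a i j)
  · exact pv_dec2 _ _ _ h2.2 (pvGA_lt_K a i j)
  · exact pv_dec2 _ _ _ h3.2 (pvGA_lt_K a i j)
  · exact pv_dec2 _ _ _ h4.2 (pvGA_lt_K a i j)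

def lpm_dp_table (array : List (List Int)) (n : Int) : Int :=
  let dp := List.replicate n.toNat (List.replicate n.toNat (0:Int))
  let filled := (PySem.List.pyRange 0 n 1).foldl
    (fun t i => (PySem.List.pyRange 0 n 1).foldl (fun t j => (lpmAux array t n i j).1) t) dp
  (PySem.List.pyRange 0 n 1).foldl
    (fun l i => (PySem.List.pyRange 0 n 1).foldl (fun l j => max l (pvGA filled i j)) l) 0

-- ===== PORT B =====
-- first neighbour (down, right, left, up) whose value is current+1, or none
def pvStep (a : List (List Int)) (n i j : Int) : Option (Int × Int) :=
  if i + 1 < n ∧ pvGA a (i+1) j = pvGA a i j + 1 then some (i+1, j)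
  else if j + 1 < n ∧ pvGA a i (j+1) = pvGA a i j + 1 then some (i, j+1)
  else if 0 < j ∧ pvGA a i (j-1) = pvGA a i j + 1 then some (i, j-1)
  else if 0 < i ∧ pvGA a (i-1) j = pvGA a i j + 1 then some (i-1, j)
  else none

-- generic fact about a 4-way if-chain of `some`s, kept abstract so its proof term stays small
theorem pv_ite4_some {α : Type} (c1 c2 c3 c4 : Prop) [Decidable c1] [Decidable c2]
    [Decidable c3] [Decidable c4] (x1 x2 x3 x4 y : α) (P : α → Prop)
    (h : (if c1 then some x1 else if c2 then some x2 else if c3 then some x3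
          else if c4 then some x4 else none) = some y)
    (h1 : c1 → P x1) (h2 : c2 → P x2) (h3 : c3 → P x3) (h4 : c4 → P x4) : P y := by
  split at h
  next hc => injection h with h2'; rw [← h2']; exact h1 hc
  next =>
    split at h
    next hc => injection h with h2'; rw [← h2']; exact h2 hc
    next =>
      split at h
      next hc => injection h with h2'; rw [← h2']; exact h3 hc
      next =>
        split at h
        next hc => injection h with h2'; rw [← h2']; exact h4 hc
        next => cases h

theorem pvStep_some (a : List (List Int)) (n i j i' j' : Int)
    (h : pvStep a n i j = some (i', j')) : pvGA a i' j' = pvGA a i j + 1 := by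
  unfold pvStep at h
  exact pv_ite4_some _ _ _ _ (i+1, j) (i, j+1) (i, j-1) (i-1, j) (i', j')
    (fun p => pvGA a p.1 p.2 = pvGA a i j + 1) h
    (fun hc => hc.2) (fun hc => hc.2) (fun hc => hc.2) (fun hc => hc.2)

-- the while-loop of Source B: follow the chain, counting steps in `len`
def pvWalk (a : List (List Int)) (n i j len : Int) : Int :=
  match h : pvStep a n i j with
  | none => len
  | some (i', j') => pvWalk a n i' j' (len + 1)
termination_by (pvKA a - pvGA a i j).toNat
decreasing_by
  exact pv_dec2 _ _ _ (pvStep_some a n i j i' j' h) (pvGA_lt_K a i j)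

def lpm_dp_table_alt (array : List (List Int)) (n : Int) : Int :=
  (PySem.List.pyRange 0 n 1).foldl
    (fun longest i => (PySem.List.pyRange 0 n 1).foldl
      (fun longest j => max longest (pvWalk array n i j 1)) longest) 0

-- ===== PRECONDITION & SPEC =====
-- Pre_ excludes exactly the inputs on which Python A raises IndexError: when 0 ≤ n the
-- first n rows (and the array itself) must have length ≥ n.
def Pre_lpm_dp_table (array : List (List Int)) (n : Int) : Prop :=
  n.toNat ≤ array.length ∧ ∀ r ∈ array.take n.toNat, n.toNat ≤ r.length
instance (array : List (List Int)) (n : Int) : Decidable (Pre_lpm_dp_table array n) := by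
  unfold Pre_lpm_dp_table; infer_instance
def pvWitness_lpm_dp_table : List (List Int) × Int := ([[1, 2], [4, 3]], 2)

def Spec_lpm_dp_table (array : List (List Int)) (n : Int) (out : Int) : Prop := out = lpm_dp_table_alt array n
instance (array : List (List Int)) (n : Int) (out : Int) : Decidable (Spec_lpm_dp_table array n out) := by unfold Spec_lpm_dp_table; infer_instance

-- ===== CLAIM (what is proved, stated in full; the proofs are below) =====
def Claim_equal_lpm_dp_table : Prop := ∀ (array : List (List Int)) (n : Int), Dom_lpm_dp_table array n → Pre_lpm_dp_table array n → Spec_lpm_dp_table array n (lpm_dp_table array n)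

-- ===== LEMMAS AND PROOFS =====

theorem pv_dec (K x y : Int) (k : Nat) (hk : (K - x).toNat = k) (hy : y = x + 1) (hK : x < K) :
    (K - y).toNat < k := by
  rw [← hk]; exact pv_dec2 K x y hy hK


theorem pv_add1_nonneg (i : Int) (h : 0 ≤ i) : 0 ≤ i + 1 :=
  le_trans h (le_of_lt (lt_add_one i))


theorem pv_sub1_nonneg (j : Int) (h : 0 < j) : 0 ≤ j - 1 := by
  have h1 : 0 + 1 ≤ j := Int.lt_iff_add_one_le.mp h
  rw [zero_add] at h1
  exact sub_nonneg.mpr h1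


theorem pv_sub1_lt (j n : Int) (h : j < n) : j - 1 < n :=
  lt_of_le_of_lt (sub_le_self j zero_le_one) h


theorem pv_toNat_ne (i q : Int) (h0 : 0 ≤ i) (hq0 : 0 ≤ q) (h : q ≠ i) : i.toNat ≠ q.toNat :=
  fun he => h (by rw [← Int.toNat_of_nonneg hq0, ← Int.toNat_of_nonneg h0, he])



-- pure chain length of the greedy walk starting at (i,j) (proof-side helper)
def pvC (a : List (List Int)) (n i j : Int) : Int :=
  if h1 : i + 1 < n ∧ pvGA a (i+1) j = pvGA a i j + 1 then pvC a n (i+1) j + 1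
  else if h2 : j + 1 < n ∧ pvGA a i (j+1) = pvGA a i j + 1 then pvC a n i (j+1) + 1
  else if h3 : 0 < j ∧ pvGA a i (j-1) = pvGA a i j + 1 then pvC a n i (j-1) + 1
  else if h4 : 0 < i ∧ pvGA a (i-1) j = pvGA a i j + 1 then pvC a n (i-1) j + 1
  else 1
termination_by (pvKA a - pvGA a i j).toNat
decreasing_by
  · exact pv_dec2 _ _ _ h1.2 (pvGA_lt_K a i j)
  · exact pv_dec2 _ _ _ h2.2 (pvGA_lt_K a i j)
  · exact pv_dec2 _ _ _ h3.2 (pvGA_lt_K a i j)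
  · exact pv_dec2 _ _ _ h4.2 (pvGA_lt_K a i j)

theorem pvC_none (a : List (List Int)) (n i j : Int) (h : pvStep a n i j = none) :
    pvC a n i j = 1 := by
  unfold pvStep at h
  rw [pvC.eq_def]
  split_ifs at h ⊢
  all_goals simp_all

theorem pvC_some (a : List (List Int)) (n i j i' j' : Int) (h : pvStep a n i j = some (i', j')) :
    pvC a n i j = pvC a n i' j' + 1 := by
  unfold pvStep at h
  rw [pvC.eq_def]
  split_ifs at h ⊢
  all_goals simp_all

theorem pvWalk_eq (a : List (List Int)) (n : Int) :
    ∀ (k : Nat) (i j len : Int), (pvKA a - pvGA a i j).toNat = k →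
      pvWalk a n i j len = len + (pvC a n i j - 1) := by
  intro k
  induction k using Nat.strong_induction_on with
  | _ k IH =>
    intro i j len hk
    rw [pvWalk]
    split
    · next h => rw [pvC_none a n i j h]; ring
    · next i' j' h =>
      have hs := pvStep_some a n i j i' j' h
      have hlt := pvGA_lt_K a i j
      rw [IH (pvKA a - pvGA a i' j').toNat (pv_dec _ _ _ k hk hs hlt) i' j' (len+1) rfl,
          pvC_some a n i j i' j' h]
      ring

def pvInB (n i j : Int) : Prop := 0 ≤ i ∧ i < n ∧ 0 ≤ j ∧ j < n

def pvShapeT (t : List (List Int)) (n : Int) : Prop :=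
  t.length = n.toNat ∧ ∀ r ∈ t, r.length = n.toNat

def pvGoodT (a t : List (List Int)) (n : Int) : Prop :=
  ∀ p q, pvInB n p q → pvGA t p q = 0 ∨ pvGA t p q = pvC a n p q

theorem pv_getD_set_self {α : Type} (l : List α) (k : Nat) (a d : α) (h : k < l.length) :
    (l.set k a).getD k d = a := by
  rw [List.getD_eq_getElem _ d (by simpa using h)]
  simp

theorem pv_getD_set_ne {α : Type} (l : List α) (k k' : Nat) (a d : α) (hne : k ≠ k') :
    (l.set k a).getD k' d = l.getD k' d := by
  rcases Nat.lt_or_ge k' l.length with h | h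
  · rw [List.getD_eq_getElem _ d (by simpa using h), List.getD_eq_getElem _ d h]
    simp [hne]
  · rw [List.getD_eq_default _ d (by simpa using h), List.getD_eq_default _ d h]

theorem pvSet_shape (t : List (List Int)) (n i j v : Int) (hs : pvShapeT t n) :
    pvShapeT (pvSet t i j v) n := by
  obtain ⟨hl, hr⟩ := hs
  by_cases hi : i.toNat < t.length
  · refine ⟨by simpa [pvSet] using hl, ?_⟩
    intro r hrm
    rcases List.mem_or_eq_of_mem_set hrm with hm | rfl
    · exact hr r hm
    · have hrow : t.getD i.toNat [] = t[i.toNat] := List.getD_eq_getElem t [] hi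
      rw [hrow]
      simpa using hr _ (List.getElem_mem hi)
  · have : pvSet t i j v = t := by
      unfold pvSet
      exact List.set_eq_of_length_le (Nat.le_of_not_lt hi)
    rw [this]; exact ⟨hl, hr⟩

theorem pvGA_set (t : List (List Int)) (n i j v p q : Int)
    (hs : pvShapeT t n) (hij : pvInB n i j) (hpq : pvInB n p q) :
    pvGA (pvSet t i j v) p q = if p = i ∧ q = j then v else pvGA t p q := by
  obtain ⟨hl, hrows⟩ := hs
  obtain ⟨hi0, hin, hj0, hjn⟩ := hij
  obtain ⟨hp0, hpn, hq0, hqn⟩ := hpq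
  have hit : i.toNat < t.length := by rw [hl]; exact pv_toNat_lt i n hi0 hin
  have hrow : t.getD i.toNat [] = t[i.toNat] := List.getD_eq_getElem t [] hit
  have hrlen : (t[i.toNat]).length = n.toNat := hrows _ (List.getElem_mem hit)
  by_cases hp : p = i
  · subst hp
    unfold pvGA pvSet
    rw [pv_getD_set_self _ _ _ _ hit]
    by_cases hq : q = j
    · rw [hq, hrow, pv_getD_set_self _ _ _ _ (by rw [hrlen]; exact pv_toNat_lt j n hj0 hjn),
        if_pos ⟨rfl, rfl⟩]
    · have hne : j.toNat ≠ q.toNat := pv_toNat_ne j q hj0 hq0 hq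
      rw [pv_getD_set_ne _ _ _ _ _ hne, if_neg (by tauto)]
  · have hne : i.toNat ≠ p.toNat := pv_toNat_ne i p hi0 hp0 hp
    unfold pvGA pvSet
    rw [pv_getD_set_ne _ _ _ _ _ hne, if_neg (by tauto)]

theorem pvGA_replicate (m : Nat) (p q : Int) :
    pvGA (List.replicate m (List.replicate m (0:Int))) p q = 0 := by
  unfold pvGA
  by_cases hp : p.toNat < m
  · rw [List.getD_eq_getElem _ [] (by simpa using hp)]
    simp only [List.getElem_replicate]
    by_cases hq : q.toNat < m
    · rw [List.getD_eq_getElem _ 0 (by simpa using hq)]; simp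
    · rw [List.getD_eq_default _ 0 (by simpa using Nat.le_of_not_lt hq)]
  · rw [List.getD_eq_default _ [] (by simpa using Nat.le_of_not_lt hp)]; simp

-- write w into cell (i,j): if w is that cell's chain length, all invariants go through
theorem pvFinish (a : List (List Int)) (n : Int) (t t1 : List (List Int)) (i j w : Int)
    (hb : pvInB n i j) (hc : pvC a n i j = w) (hsh1 : pvShapeT t1 n)
    (h3 : ∀ p q, pvInB n p q → pvGA t1 p q = pvGA t p q ∨ pvGA t1 p q = pvC a n p q) :
    pvGA (pvSet t1 i j w) i j = pvC a n i j
    ∧ pvShapeT (pvSet t1 i j w) n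
    ∧ ∀ p q, pvInB n p q → pvGA (pvSet t1 i j w) p q = pvGA t p q
                          ∨ pvGA (pvSet t1 i j w) p q = pvC a n p q := by
  refine ⟨?_, pvSet_shape _ _ _ _ _ hsh1, ?_⟩
  · rw [pvGA_set t1 n i j w i j hsh1 hb hb, if_pos ⟨rfl, rfl⟩, hc]
  · intro p q hpq
    rw [pvGA_set t1 n i j w p q hsh1 hb hpq]
    split_ifs with h
    · right; obtain ⟨rfl, rfl⟩ := h; exact hc.symm
    · exact h3 p q hpq

-- main invariant lemma for A's memoized recursion
theorem lpmAux_main (a : List (List Int)) (n : Int) :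
    ∀ (k : Nat) (t : List (List Int)) (i j : Int), (pvKA a - pvGA a i j).toNat = k →
      pvShapeT t n → pvInB n i j → pvGoodT a t n →
      (lpmAux a t n i j).2 = pvC a n i j
      ∧ pvShapeT (lpmAux a t n i j).1 n
      ∧ (∀ p q, pvInB n p q → pvGA (lpmAux a t n i j).1 p q = pvGA t p q
                            ∨ pvGA (lpmAux a t n i j).1 p q = pvC a n p q)
      ∧ pvGA (lpmAux a t n i j).1 i j = pvC a n i j := by
  intro k
  induction k using Nat.strong_induction_on with
  | _ k IH =>
  intro t i j hk hs hb hg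
  have hklt := pvGA_lt_K a i j
  obtain ⟨hi0, hin, hj0, hjn⟩ := hb
  rw [lpmAux.eq_def]
  split_ifs with h1 hc1 h2 hc2 h3 hc3 h4 hc4
  -- down, cached
  · have hb' : pvInB n (i+1) j := ⟨pv_add1_nonneg i hi0, h1.1, hj0, hjn⟩
    have hstep : pvStep a n i j = some (i+1, j) := by unfold pvStep; rw [if_pos h1]
    have hcv : pvGA t (i+1) j = pvC a n (i+1) j := (hg _ _ hb').resolve_left hc1
    have hc : pvC a n i j = pvGA t (i+1) j + 1 := by
      rw [pvC_some a n i j _ _ hstep, hcv]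
    obtain ⟨f1, f2, f3⟩ := pvFinish a n t t i j _ ⟨hi0, hin, hj0, hjn⟩ hc hs
      (fun p q _ => Or.inl rfl)
    exact ⟨f1, f2, f3, f1⟩
  -- down, recurse
  · have hb' : pvInB n (i+1) j := ⟨pv_add1_nonneg i hi0, h1.1, hj0, hjn⟩
    have hstep : pvStep a n i j = some (i+1, j) := by unfold pvStep; rw [if_pos h1]
    have hdec : (pvKA a - pvGA a (i+1) j).toNat < k := pv_dec _ _ _ k hk h1.2 hklt
    obtain ⟨e1, e2, e3, e4⟩ := IH _ hdec t (i+1) j rfl hs hb' hg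
    have hc : pvC a n i j = (lpmAux a t n (i+1) j).2 + 1 := by
      rw [pvC_some a n i j _ _ hstep, e1]
    obtain ⟨f1, f2, f3⟩ := pvFinish a n t _ i j _ ⟨hi0, hin, hj0, hjn⟩ hc e2 e3
    exact ⟨f1, f2, f3, f1⟩
  -- right, cached
  · have hb' : pvInB n i (j+1) := ⟨hi0, hin, pv_add1_nonneg j hj0, h2.1⟩
    have hstep : pvStep a n i j = some (i, j+1) := by
      unfold pvStep; rw [if_neg h1, if_pos h2]
    have hcv : pvGA t i (j+1) = pvC a n i (j+1) := (hg _ _ hb').resolve_left hc2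
    have hc : pvC a n i j = pvGA t i (j+1) + 1 := by
      rw [pvC_some a n i j _ _ hstep, hcv]
    obtain ⟨f1, f2, f3⟩ := pvFinish a n t t i j _ ⟨hi0, hin, hj0, hjn⟩ hc hs
      (fun p q _ => Or.inl rfl)
    exact ⟨f1, f2, f3, f1⟩
  -- right, recurse
  · have hb' : pvInB n i (j+1) := ⟨hi0, hin, pv_add1_nonneg j hj0, h2.1⟩
    have hstep : pvStep a n i j = some (i, j+1) := by
      unfold pvStep; rw [if_neg h1, if_pos h2]
    have hdec : (pvKA a - pvGA a i (j+1)).toNat < k := pv_dec _ _ _ k hk h2.2 hklt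
    obtain ⟨e1, e2, e3, e4⟩ := IH _ hdec t i (j+1) rfl hs hb' hg
    have hc : pvC a n i j = (lpmAux a t n i (j+1)).2 + 1 := by
      rw [pvC_some a n i j _ _ hstep, e1]
    obtain ⟨f1, f2, f3⟩ := pvFinish a n t _ i j _ ⟨hi0, hin, hj0, hjn⟩ hc e2 e3
    exact ⟨f1, f2, f3, f1⟩
  -- left, cached
  · have hb' : pvInB n i (j-1) := ⟨hi0, hin, pv_sub1_nonneg j h3.1, pv_sub1_lt j n hjn⟩
    have hstep : pvStep a n i j = some (i, j-1) := by
      unfold pvStep; rw [if_neg h1, if_neg h2, if_pos h3]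
    have hcv : pvGA t i (j-1) = pvC a n i (j-1) := (hg _ _ hb').resolve_left hc3
    have hc : pvC a n i j = pvGA t i (j-1) + 1 := by
      rw [pvC_some a n i j _ _ hstep, hcv]
    obtain ⟨f1, f2, f3⟩ := pvFinish a n t t i j _ ⟨hi0, hin, hj0, hjn⟩ hc hs
      (fun p q _ => Or.inl rfl)
    exact ⟨f1, f2, f3, f1⟩
  -- left, recurse
  · have hb' : pvInB n i (j-1) := ⟨hi0, hin, pv_sub1_nonneg j h3.1, pv_sub1_lt j n hjn⟩
    have hstep : pvStep a n i j = some (i, j-1) := by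
      unfold pvStep; rw [if_neg h1, if_neg h2, if_pos h3]
    have hdec : (pvKA a - pvGA a i (j-1)).toNat < k := pv_dec _ _ _ k hk h3.2 hklt
    obtain ⟨e1, e2, e3, e4⟩ := IH _ hdec t i (j-1) rfl hs hb' hg
    have hc : pvC a n i j = (lpmAux a t n i (j-1)).2 + 1 := by
      rw [pvC_some a n i j _ _ hstep, e1]
    obtain ⟨f1, f2, f3⟩ := pvFinish a n t _ i j _ ⟨hi0, hin, hj0, hjn⟩ hc e2 e3
    exact ⟨f1, f2, f3, f1⟩
  -- up, cached
  · have hb' : pvInB n (i-1) j := ⟨pv_sub1_nonneg i h4.1, pv_sub1_lt i n hin, hj0, hjn⟩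
    have hstep : pvStep a n i j = some (i-1, j) := by
      unfold pvStep; rw [if_neg h1, if_neg h2, if_neg h3, if_pos h4]
    have hcv : pvGA t (i-1) j = pvC a n (i-1) j := (hg _ _ hb').resolve_left hc4
    have hc : pvC a n i j = pvGA t (i-1) j + 1 := by
      rw [pvC_some a n i j _ _ hstep, hcv]
    obtain ⟨f1, f2, f3⟩ := pvFinish a n t t i j _ ⟨hi0, hin, hj0, hjn⟩ hc hs
      (fun p q _ => Or.inl rfl)
    exact ⟨f1, f2, f3, f1⟩
  -- up, recurse
  · have hb' : pvInB n (i-1) j := ⟨pv_sub1_nonneg i h4.1, pv_sub1_lt i n hin, hj0, hjn⟩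
    have hstep : pvStep a n i j = some (i-1, j) := by
      unfold pvStep; rw [if_neg h1, if_neg h2, if_neg h3, if_pos h4]
    have hdec : (pvKA a - pvGA a (i-1) j).toNat < k := pv_dec _ _ _ k hk h4.2 hklt
    obtain ⟨e1, e2, e3, e4⟩ := IH _ hdec t (i-1) j rfl hs hb' hg
    have hc : pvC a n i j = (lpmAux a t n (i-1) j).2 + 1 := by
      rw [pvC_some a n i j _ _ hstep, e1]
    obtain ⟨f1, f2, f3⟩ := pvFinish a n t _ i j _ ⟨hi0, hin, hj0, hjn⟩ hc e2 e3
    exact ⟨f1, f2, f3, f1⟩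
  -- no neighbour
  · have hstep : pvStep a n i j = none := by
      unfold pvStep; rw [if_neg h1, if_neg h2, if_neg h3, if_neg h4]
    have hc : pvC a n i j = 1 := pvC_none a n i j hstep
    obtain ⟨f1, f2, f3⟩ := pvFinish a n t t i j 1 ⟨hi0, hin, hj0, hjn⟩ hc hs
      (fun p q _ => Or.inl rfl)
    exact ⟨f1, f2, f3, f1⟩

-- the inner fill loop (over j) computes every visited cell's chain length
theorem pv_inner (a : List (List Int)) (n i : Int) (hi : 0 ≤ i ∧ i < n) :
    ∀ (js : List Int), (∀ x ∈ js, 0 ≤ x ∧ x < n) →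
    ∀ (t : List (List Int)), pvShapeT t n → pvGoodT a t n →
      pvShapeT (js.foldl (fun t j => (lpmAux a t n i j).1) t) n
      ∧ pvGoodT a (js.foldl (fun t j => (lpmAux a t n i j).1) t) n
      ∧ (∀ p q, pvInB n p q → pvGA t p q = pvC a n p q →
          pvGA (js.foldl (fun t j => (lpmAux a t n i j).1) t) p q = pvC a n p q)
      ∧ (∀ x ∈ js, pvGA (js.foldl (fun t j => (lpmAux a t n i j).1) t) i x = pvC a n i x) := by
  intro js
  induction js with
  | nil => intro _ t hs hg; exact ⟨hs, hg, fun p q _ h => h, by simp⟩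
  | cons j js ihj =>
    intro hmem t hs hg
    have hbj : pvInB n i j := ⟨hi.1, hi.2, (hmem j (by simp)).1, (hmem j (by simp)).2⟩
    obtain ⟨e1, e2, e3, e4⟩ := lpmAux_main a n _ t i j rfl hs hbj hg
    have hg1 : pvGoodT a (lpmAux a t n i j).1 n := by
      intro p q hpq
      rcases e3 p q hpq with h | h
      · rw [h]; exact hg p q hpq
      · right; exact h
    have hpres : ∀ p q, pvInB n p q → pvGA t p q = pvC a n p q →
        pvGA (lpmAux a t n i j).1 p q = pvC a n p q := by
      intro p q hpq hd
      rcases e3 p q hpq with h | h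
      · rw [h]; exact hd
      · exact h
    obtain ⟨f1, f2, f3, f4⟩ := ihj (fun x hx => hmem x (by simp [hx])) (lpmAux a t n i j).1 e2 hg1
    simp only [List.foldl_cons]
    refine ⟨f1, f2, ?_, ?_⟩
    · intro p q hpq hd
      exact f3 p q hpq (hpres p q hpq hd)
    · intro x hx
      rcases List.mem_cons.mp hx with rfl | hx'
      · exact f3 i x hbj e4
      · exact f4 x hx'

-- the outer fill loop (over i)
theorem pv_outer (a : List (List Int)) (n : Int) :
    ∀ (is : List Int), (∀ x ∈ is, 0 ≤ x ∧ x < n) →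
    ∀ (t : List (List Int)), pvShapeT t n → pvGoodT a t n →
      pvShapeT (is.foldl (fun t i => (PySem.List.pyRange 0 n 1).foldl
        (fun t j => (lpmAux a t n i j).1) t) t) n
      ∧ pvGoodT a (is.foldl (fun t i => (PySem.List.pyRange 0 n 1).foldl
        (fun t j => (lpmAux a t n i j).1) t) t) n
      ∧ (∀ p q, pvInB n p q → pvGA t p q = pvC a n p q →
          pvGA (is.foldl (fun t i => (PySem.List.pyRange 0 n 1).foldl
            (fun t j => (lpmAux a t n i j).1) t) t) p q = pvC a n p q)
      ∧ (∀ x ∈ is, ∀ y, 0 ≤ y → y < n →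
          pvGA (is.foldl (fun t i => (PySem.List.pyRange 0 n 1).foldl
            (fun t j => (lpmAux a t n i j).1) t) t) x y = pvC a n x y) := by
  intro is
  induction is with
  | nil => intro _ t hs hg; exact ⟨hs, hg, fun p q _ h => h, by simp⟩
  | cons i is ihi =>
    intro hmem t hs hg
    have hbi : 0 ≤ i ∧ i < n := hmem i (by simp)
    obtain ⟨e1, e2, e3, e4⟩ := pv_inner a n i hbi (PySem.List.pyRange 0 n 1)
      (fun x hx => (PySem.List.mem_pyRange_one.mp hx)) t hs hg
    obtain ⟨f1, f2, f3, f4⟩ := ihi (fun x hx => hmem x (by simp [hx])) _ e1 e2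
    simp only [List.foldl_cons]
    refine ⟨f1, f2, ?_, ?_⟩
    · intro p q hpq hd
      exact f3 p q hpq (e3 p q hpq hd)
    · intro x hx y hy0 hyn
      rcases List.mem_cons.mp hx with rfl | hx'
      · exact f3 x y ⟨hbi.1, hbi.2, hy0, hyn⟩
          (e4 y (PySem.List.mem_pyRange_one.mpr ⟨hy0, hyn⟩))
      · exact f4 x hx' y hy0 hyn

theorem pv_foldl_congr {α β : Type} (f g : β → α → β) :
    ∀ (l : List α) (acc : β), (∀ acc' x, x ∈ l → f acc' x = g acc' x) →
      l.foldl f acc = l.foldl g acc := by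
  intro l
  induction l with
  | nil => intros; rfl
  | cons x xs ih =>
    intro acc h
    simp only [List.foldl_cons]
    rw [h acc x (by simp)]
    exact ih _ (fun a y hy => h a y (by simp [hy]))

-- ===== VERDICT (by name: the statement is the Claim_ definition above) =====
theorem lpm_dp_table_spec : Claim_equal_lpm_dp_table := by
  unfold Claim_equal_lpm_dp_table
  intro array n _hdom _hpre
  unfold Spec_lpm_dp_table lpm_dp_table lpm_dp_table_alt
  have hshape : pvShapeT (List.replicate n.toNat (List.replicate n.toNat (0:Int))) n := by
    constructor
    · simp
    · intro r hr
      rw [List.eq_of_mem_replicate hr]; simp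
  have hgood : pvGoodT array (List.replicate n.toNat (List.replicate n.toNat (0:Int))) n := by
    intro p q _
    left; exact pvGA_replicate _ _ _
  obtain ⟨_, _, _, hdone⟩ := pv_outer array n (PySem.List.pyRange 0 n 1)
    (fun x hx => PySem.List.mem_pyRange_one.mp hx)
    (List.replicate n.toNat (List.replicate n.toNat (0:Int))) hshape hgood
  refine pv_foldl_congr _ _ _ 0 ?_
  intro acc i hi
  refine pv_foldl_congr _ _ _ acc ?_
  intro acc' j hj
  obtain ⟨hj0, hjn⟩ := PySem.List.mem_pyRange_one.mp hj
  rw [hdone i hi j hj0 hjn, pvWalk_eq array n _ i j 1 rfl]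
  have : 1 + (pvC array n i j - 1) = pvC array n i j := by ring
  rw [this]
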